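-- pv_equiv track=rewrite | github.com/YIWEI-CHEN/leetcode | 0039_2_max_even_sum_subarray_of_k.py | maxEvenSumSubarray
-- ===== SOURCE A (Python) =====
-- from functools import lru_cache
--
-- def maxEvenSumSubarray(A, K) -> int:
--     if K > len(A):
--         return -1
--     evens = [elmnt for elmnt in A if not elmnt & 1]
--     odds = [elmnt for elmnt in A if elmnt & 1]
--     evens.sort(reverse=True)
--     odds.sort(reverse=True)
--     m, n = len(evens), len(odds)
--
--     @lru_cache(None)
--     def dp(i, j, k):
--         if k <= 0:
--             return 0
--         # choose even
--         p1 = -1 if i >= m else dp(i + 1, j, k - 1) + evens[i]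
--         # choose odd
--         p2 = -1 if k < 2 or j + 1 >= n else dp(i, j + 2, k - 2) + odds[j] + odds[j + 1]
--
--         return max(p1, p2)
--
--     return dp(0, 0, K)
-- ===== SOURCE B (Python) =====
-- def maxEvenSumSubarray(A, K) -> int:
--     if K > len(A):
--         return -1
--     evens = sorted((x for x in A if x % 2 == 0), reverse=True)
--     odds = sorted((x for x in A if x % 2 != 0), reverse=True)
--     m, n = len(evens), len(odds)
--     # Bottom-up tabulation over the number k of slots still to fill.  Taking an
--     # even consumes one slot, taking a pair of odds two, so a state with k slots
--     # left and j odds taken has exactly K - k - j evens taken: one rolling row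
--     # per k, indexed by t = j // 2.
--     width = n // 2 + 1
--     prev2 = [0] * width  # row for k - 2
--     prev1 = [0] * width  # row for k - 1 (k = 0: nothing left to fill scores 0)
--     for k in range(1, K + 1):
--         row = []
--         for t in range(width):
--             j = 2 * t
--             i = K - k - j
--             p1 = prev1[t] + evens[i] if 0 <= i < m else -1
--             p2 = prev2[t + 1] + odds[j] + odds[j + 1] if k >= 2 and j + 1 < n else -1
--             row.append(max(p1, p2))
--         prev2, prev1 = prev1, row
--     return prev1[0]
-- ===== Notes on version B (the rewrite author's own statement) =====
-- stated objective: alternative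
-- what changed: A's lru_cache-memoized top-down recursion over the three-index state (evens taken, odds taken, slots left) is replaced by a bottom-up tabulation with two rolling rows over a two-index state, using the invariant that the number of evens taken is determined by the slots left and the odds taken.
import Mathlib
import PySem

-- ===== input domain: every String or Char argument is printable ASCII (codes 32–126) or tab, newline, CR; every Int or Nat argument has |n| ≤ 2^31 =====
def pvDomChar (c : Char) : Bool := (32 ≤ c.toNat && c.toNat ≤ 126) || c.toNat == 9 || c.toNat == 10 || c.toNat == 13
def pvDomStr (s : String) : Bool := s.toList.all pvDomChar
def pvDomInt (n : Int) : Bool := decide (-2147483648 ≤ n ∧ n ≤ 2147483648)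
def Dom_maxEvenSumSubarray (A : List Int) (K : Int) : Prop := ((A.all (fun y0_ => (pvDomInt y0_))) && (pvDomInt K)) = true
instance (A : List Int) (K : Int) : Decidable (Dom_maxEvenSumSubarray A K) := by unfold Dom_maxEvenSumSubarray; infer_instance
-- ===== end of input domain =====

-- B replaces A's memoized three-index recursion by a bottom-up tabulation with two rolling
-- rows over a two-index state (slots left, odds taken), using the invariant that the number
-- of evens taken is determined by the other two.

-- ===== PORT A =====
-- dp helper: the memoized recursion ported as plain recursion on k (same values on every
-- call; the cache only affects speed). p1/p2 are inlined into the final max (pure values).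
-- evens[i], odds[j], odds[j+1] are read only under the guards i < m resp. j + 1 < n,
-- so pyGetD _ _ 0 is exact there.
def dpA (evens odds : List Int) (i j k : Int) : Int :=
  if k ≤ 0 then 0
  else
    max (if i ≥ (evens.length : Int) then -1
         else dpA evens odds (i + 1) j (k - 1) + PySem.List.pyGetD evens i 0)
        (if k < 2 ∨ j + 1 ≥ (odds.length : Int) then -1
         else dpA evens odds i (j + 2) (k - 2) + PySem.List.pyGetD odds j 0
              + PySem.List.pyGetD odds (j + 1) 0)
termination_by k.toNat
decreasing_by all_goals omega

def maxEvenSumSubarray (A : List Int) (K : Int) : Int :=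
  if K > (A.length : Int) then -1
  else
    -- `not (elmnt & 1)` on a Python int is `x & 1 == 0` (exact via PySem.Int.band)
    let evens := PySem.List.sorted (A.filter (fun x => PySem.Int.band x 1 == 0)) (fun x => x) true
    let odds := PySem.List.sorted (A.filter (fun x => !(PySem.Int.band x 1 == 0))) (fun x => x) true
    dpA evens odds 0 0 K

-- ===== PORT B =====
-- the inner t-loop of Source B: builds one row (indexed by t = j // 2) by appending;
-- prev1/prev2 are read at in-range indices only, so pyGetD _ _ 0 is exact, as are
-- the guarded reads evens[i], odds[j], odds[j+1]
def bEntry (evens odds : List Int) (K k : Int) (prev2 prev1 : List Int) (t : Nat) : Int :=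
  let j : Int := 2 * (t : Int)
  let i : Int := K - k - j
  let p1 : Int := if 0 ≤ i ∧ i < (evens.length : Int) then
      PySem.List.pyGetD prev1 (t : Int) 0 + PySem.List.pyGetD evens i 0 else -1
  let p2 : Int := if 2 ≤ k ∧ j + 1 < (odds.length : Int) then
      PySem.List.pyGetD prev2 ((t : Int) + 1) 0 + PySem.List.pyGetD odds j 0
        + PySem.List.pyGetD odds (j + 1) 0 else -1
  max p1 p2

def bRow (evens odds : List Int) (K k : Int) (prev2 prev1 : List Int) (width : Nat) : List Int :=
  (List.range width).foldl (fun row t => row ++ [bEntry evens odds K k prev2 prev1 t]) []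

def maxEvenSumSubarray_alt (A : List Int) (K : Int) : Int :=
  if K > (A.length : Int) then -1
  else
    let evens := PySem.List.sorted (A.filter (fun x => PySem.Int.mod x 2 == 0)) (fun x => x) true
    let odds := PySem.List.sorted (A.filter (fun x => !(PySem.Int.mod x 2 == 0))) (fun x => x) true
    let width : Nat := odds.length / 2 + 1
    let st := (PySem.List.pyRange 1 (K + 1) 1).foldl
      (fun (st : List Int × List Int) k => (st.2, bRow evens odds K k st.1 st.2 width))
      (List.replicate width 0, List.replicate width 0)
    PySem.List.pyGetD st.2 0 0

-- ===== PRECONDITION & SPEC =====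
def Spec_maxEvenSumSubarray (A : List Int) (K : Int) (out : Int) : Prop := out = maxEvenSumSubarray_alt A K
instance (A : List Int) (K : Int) (out : Int) : Decidable (Spec_maxEvenSumSubarray A K out) := by unfold Spec_maxEvenSumSubarray; infer_instance

-- ===== CLAIM (what is proved, stated in full; the proofs are below) =====
def Claim_equal_maxEvenSumSubarray : Prop := ∀ (A : List Int) (K : Int), Dom_maxEvenSumSubarray A K → Spec_maxEvenSumSubarray A K (maxEvenSumSubarray A K)

-- ===== LEMMAS AND PROOFS =====

lemma dpA_nonpos (E O : List Int) (i j k : Int) (hk : k ≤ 0) : dpA E O i j k = 0 := by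
  rw [dpA, if_pos hk]

lemma dpA_pos (E O : List Int) (i j k : Int) (hk : 0 < k) :
    dpA E O i j k =
      max (if i ≥ (E.length : Int) then -1
           else dpA E O (i + 1) j (k - 1) + PySem.List.pyGetD E i 0)
          (if k < 2 ∨ j + 1 ≥ (O.length : Int) then -1
           else dpA E O i (j + 2) (k - 2) + PySem.List.pyGetD O j 0
                + PySem.List.pyGetD O (j + 1) 0) := by
  rw [dpA]; rw [if_neg (by omega)]

-- the state (prev2, prev1) after c iterations of B's k-loop
def bIter (E O : List Int) (K : Int) (width : Nat) : Nat → List Int × List Int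
  | 0 => (List.replicate width 0, List.replicate width 0)
  | c + 1 => ((bIter E O K width c).2,
      bRow E O K ((c : Int) + 1) (bIter E O K width c).1 (bIter E O K width c).2 width)

lemma bRow_getD (E O : List Int) (K k : Int) (prev2 prev1 : List Int) (width : Nat)
    (t : Nat) (ht : t < width) :
    (bRow E O K k prev2 prev1 width).getD t 0 =
      max (if 0 ≤ K - k - 2 * (t : Int) ∧ K - k - 2 * (t : Int) < (E.length : Int) then
            prev1.getD t 0 + PySem.List.pyGetD E (K - k - 2 * (t : Int)) 0 else -1)
          (if 2 ≤ k ∧ 2 * (t : Int) + 1 < (O.length : Int) then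
            prev2.getD (t + 1) 0 + PySem.List.pyGetD O (2 * (t : Int)) 0
              + PySem.List.pyGetD O (2 * (t : Int) + 1) 0 else -1) := by
  rw [bRow, PySem.List.foldl_append_singleton_eq_map, List.nil_append,
      List.getD_eq_getElem _ _ (by simpa using ht)]
  rw [List.getElem_map, List.getElem_range]
  unfold bEntry
  rw [show ((t : Int) + 1) = ((t + 1 : Nat) : Int) by push_cast; ring]
  simp only [PySem.List.pyGetD_natCast]

lemma foldl_pyRange_eq_bIter (E O : List Int) (K : Int) (width : Nat) (c : Nat) :
    (PySem.List.pyRange 1 ((c : Int) + 1) 1).foldl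
      (fun (st : List Int × List Int) k => (st.2, bRow E O K k st.1 st.2 width))
      (List.replicate width 0, List.replicate width 0) = bIter E O K width c := by
  induction c with
  | zero => rw [PySem.List.pyRange_one_eq_nil (by omega)]; rfl
  | succ c ih =>
    rw [show (((c + 1 : Nat) : Int) + 1) = (((c : Int) + 1) + 1) by push_cast; ring,
        PySem.List.pyRange_one_succ_right (by omega), List.foldl_append, ih]
    simp [bIter]

-- loop invariant: each row entry equals the corresponding dp value, for the states the
-- recursion can actually reach (i = K - k - j ≥ 0)
lemma bIter_spec (E O : List Int) (K : Int) (c : Nat) :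
    (∀ t : Nat, t < O.length / 2 + 1 → 0 ≤ K - c - 2 * t →
        (bIter E O K (O.length / 2 + 1) c).2.getD t 0
          = dpA E O (K - c - 2 * t) (2 * t) c) ∧
    (∀ t : Nat, t < O.length / 2 + 1 → 0 ≤ K - ((c : Int) - 1) - 2 * t →
        (bIter E O K (O.length / 2 + 1) c).1.getD t 0
          = dpA E O (K - ((c : Int) - 1) - 2 * t) (2 * t) ((c : Int) - 1)) := by
  induction c with
  | zero =>
    constructor <;> intro t ht _ <;>
      · rw [dpA_nonpos E O _ _ _ (by norm_num)]
        simp [bIter, ht]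
  | succ c ih =>
    obtain ⟨ih2, ih1⟩ := ih
    constructor
    · intro t ht hi
      have hrow : (bIter E O K (O.length / 2 + 1) (c + 1)).2
          = bRow E O K ((c : Int) + 1) (bIter E O K (O.length / 2 + 1) c).1
              (bIter E O K (O.length / 2 + 1) c).2 (O.length / 2 + 1) := rfl
      rw [hrow, bRow_getD E O K _ _ _ _ t ht]
      push_cast at hi ⊢
      rw [dpA_pos E O _ _ _ (by omega)]
      congr 1
      · -- even branch
        by_cases hm : K - ((c : Int) + 1) - 2 * (t : Int) < (E.length : Int)
        · rw [if_pos ⟨by omega, hm⟩, if_neg (by omega)]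
          have := ih2 t ht (by omega)
          push_cast at this
          rw [this]
          congr 2 <;> ring
        · rw [if_neg (by omega), if_pos (by omega)]
      · -- odd branch
        by_cases hg : 2 ≤ (c : Int) + 1 ∧ 2 * (t : Int) + 1 < (O.length : Int)
        · obtain ⟨hg1, hg2⟩ := hg
          rw [if_pos ⟨hg1, hg2⟩, if_neg (by omega)]
          have ht1 : t + 1 < O.length / 2 + 1 := by omega
          have := ih1 (t + 1) ht1 (by push_cast; omega)
          push_cast at this
          rw [this]
          congr 2 <;> ring
        · rw [if_neg hg, if_pos (by omega)]
    · intro t ht hi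
      have h1 : (bIter E O K (O.length / 2 + 1) (c + 1)).1
          = (bIter E O K (O.length / 2 + 1) c).2 := rfl
      push_cast at hi ⊢
      rw [h1]
      have := ih2 t ht (by omega)
      push_cast at this
      rw [show (c : Int) + 1 - 1 = (c : Int) by ring]
      rw [show K - (c : Int) - 2 * (t : Int) = K - ((c : Int) + 1 - 1) - 2 * (t : Int) by ring] at this
      convert this using 3 <;> ring

-- Source B's parity test `x % 2 == 0` agrees with Source A's truthiness test on `x & 1`
lemma parity_filter_eq (x : Int) :
    (!(PySem.Int.mod x 2 == 0)) = (!(PySem.Int.band x 1 == 0)) := by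
  rw [PySem.Int.band_one]

lemma parity_filter_eq' (x : Int) :
    (PySem.Int.mod x 2 == 0) = (PySem.Int.band x 1 == 0) := by
  rw [PySem.Int.band_one]

-- ===== VERDICT (by name: the statement is the Claim_ definition above) =====
theorem maxEvenSumSubarray_spec : Claim_equal_maxEvenSumSubarray := by
  intro A K _
  unfold Spec_maxEvenSumSubarray
  by_cases hgt : K > (A.length : Int)
  · simp [maxEvenSumSubarray, maxEvenSumSubarray_alt, hgt]
  · simp only [maxEvenSumSubarray, maxEvenSumSubarray_alt, if_neg hgt]
    have hfe : (A.filter (fun x => PySem.Int.mod x 2 == 0))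
        = (A.filter (fun x => PySem.Int.band x 1 == 0)) :=
      List.filter_congr (fun x _ => parity_filter_eq' x)
    have hfo : (A.filter (fun x => !(PySem.Int.mod x 2 == 0)))
        = (A.filter (fun x => !(PySem.Int.band x 1 == 0))) :=
      List.filter_congr (fun x _ => parity_filter_eq x)
    rw [hfe, hfo]
    set E := PySem.List.sorted (A.filter (fun x => PySem.Int.band x 1 == 0)) (fun x => x) true
    set O := PySem.List.sorted (A.filter (fun x => !(PySem.Int.band x 1 == 0))) (fun x => x) true
    by_cases hK : K ≤ 0
    · rw [PySem.List.pyRange_one_eq_nil (by omega)]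
      rw [dpA_nonpos E O _ _ _ hK]
      simp [PySem.List.pyGetD_zero]
    · rw [show K + 1 = ((K.toNat : Int) + 1) by omega,
          foldl_pyRange_eq_bIter E O K (O.length / 2 + 1) K.toNat]
      have h0 := (bIter_spec E O K K.toNat).1 0 (by omega) (by simp; omega)
      rw [PySem.List.pyGetD_zero]
      simp only [Nat.cast_zero, mul_zero, sub_zero] at h0 ⊢
      rw [h0, show K - (K.toNat : Int) = 0 by omega, show ((K.toNat : Int)) = K by omega]
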